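-- pv_equiv track=rewrite | github.com/WeiChihLin07/CP1404Practicals | prac_03/word_generator.py | is_valid_format
-- ===== SOURCE A (Python) =====
-- VOWELS = "aeiou"
--
-- CONSONANTS = "bcdfghjklmnpqrstvwxyz"
--
-- SPECIAL_CHARACTERS = "!@#$%^&*()_-=+`~,./'[]<>?{}|\\"
--
-- def is_valid_format(word_format):
--     """Determine if the provided word format is valid."""
--     count_vowel = 0
--     count_consonant = 0
--     count_digit = 0
--     count_special = 0
--     for char in word_format:
--         if char in VOWELS:
--             count_vowel += 1
--         elif char in CONSONANTS:
--             count_consonant += 1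
--         elif char.isdigit():
--             count_digit += 1
--         elif char in SPECIAL_CHARACTERS:
--             count_special += 1
--
--     if count_vowel == 0 or count_consonant == 0 or count_digit >= 1 or count_special >= 1:
--         return False
--     else:
--         return True
-- ===== SOURCE B (Python) =====
-- VOWELS = "aeiou"
--
-- CONSONANTS = "bcdfghjklmnpqrstvwxyz"
--
-- SPECIAL_CHARACTERS = "!@#$%^&*()_-=+`~,./'[]<>?{}|\\"
--
-- def is_valid_format(word_format):
--     """Determine if the provided word format is valid."""
--     has_vowel = any(c in VOWELS for c in word_format)
--     has_consonant = any(c in CONSONANTS for c in word_format)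
--     has_digit = any(c.isdigit() for c in word_format)
--     has_special = any(c in SPECIAL_CHARACTERS for c in word_format)
--     return has_vowel and has_consonant and not has_digit and not has_special
-- ===== Notes on version B (the rewrite author's own statement) =====
-- stated objective: simpler
-- what changed: Replaces the single four-counter accumulating loop and the final counter comparison with four independent short-circuiting any() existence scans combined by a boolean expression; only each counter's zero/nonzero state mattered and the character classes do not overlap.
import Mathlib
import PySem

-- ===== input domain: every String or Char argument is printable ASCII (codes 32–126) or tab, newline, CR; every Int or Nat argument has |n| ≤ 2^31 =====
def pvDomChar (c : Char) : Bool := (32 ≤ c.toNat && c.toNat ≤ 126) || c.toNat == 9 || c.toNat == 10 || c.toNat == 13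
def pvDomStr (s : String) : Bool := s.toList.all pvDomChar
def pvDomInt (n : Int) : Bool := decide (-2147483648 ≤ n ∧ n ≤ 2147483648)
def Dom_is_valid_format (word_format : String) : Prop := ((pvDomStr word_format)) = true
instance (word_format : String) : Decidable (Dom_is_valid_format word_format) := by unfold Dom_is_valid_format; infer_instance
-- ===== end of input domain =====

-- B replaces A's single four-counter loop by four independent short-circuiting existence
-- scans; objective: simpler.
-- ===== PORT A =====
def pvVOWELS : List Char := "aeiou".toList
def pvCONSONANTS : List Char := "bcdfghjklmnpqrstvwxyz".toList
def pvSPECIAL : List Char := "!@#$%^&*()_-=+`~,./'[]<>?{}|\\".toList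

-- the loop of A: one left fold carrying the four counters
def pvCountLoop (chars : List Char) (st : Int × Int × Int × Int) : Int × Int × Int × Int :=
  chars.foldl (fun st char =>
    let (cv, cc, cd, cs) := st
    if pvVOWELS.contains char then (cv + 1, cc, cd, cs)
    else if pvCONSONANTS.contains char then (cv, cc + 1, cd, cs)
    else if PySem.Chars.isdigit char then (cv, cc, cd + 1, cs)
    else if pvSPECIAL.contains char then (cv, cc, cd, cs + 1)
    else (cv, cc, cd, cs)) st

def is_valid_format (word_format : String) : Bool :=
  let (count_vowel, count_consonant, count_digit, count_special) :=
    pvCountLoop word_format.toList (0, 0, 0, 0)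
  if count_vowel = 0 ∨ count_consonant = 0 ∨ 1 ≤ count_digit ∨ 1 ≤ count_special then
    false
  else
    true

-- ===== PORT B =====
def is_valid_format_alt (word_format : String) : Bool :=
  let has_vowel := word_format.toList.any (fun c => pvVOWELS.contains c)
  let has_consonant := word_format.toList.any (fun c => pvCONSONANTS.contains c)
  let has_digit := word_format.toList.any (fun c => PySem.Chars.isdigit c)
  let has_special := word_format.toList.any (fun c => pvSPECIAL.contains c)
  has_vowel && has_consonant && !has_digit && !has_special

-- ===== PRECONDITION & SPEC =====
def Spec_is_valid_format (word_format : String) (out : Bool) : Prop := out = is_valid_format_alt word_format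
instance (word_format : String) (out : Bool) : Decidable (Spec_is_valid_format word_format out) := by unfold Spec_is_valid_format; infer_instance

-- ===== CLAIM (what is proved, stated in full; the proofs are below) =====
def Claim_equal_is_valid_format : Prop := ∀ (word_format : String), Dom_is_valid_format word_format → Spec_is_valid_format word_format (is_valid_format word_format)

-- ===== LEMMAS AND PROOFS =====

-- the guarded class predicates of A's elif chain
def pvPV (ch : Char) : Bool := pvVOWELS.contains ch
def pvPC (ch : Char) : Bool := !pvPV ch && pvCONSONANTS.contains ch
def pvPD (ch : Char) : Bool := !pvPV ch && !pvCONSONANTS.contains ch && PySem.Chars.isdigit ch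
def pvPS (ch : Char) : Bool := !pvPV ch && !pvCONSONANTS.contains ch && !PySem.Chars.isdigit ch && pvSPECIAL.contains ch

-- the fold computes, componentwise, the count of each guarded class
lemma pvCountLoop_eq (chars : List Char) (a b c d : Int) :
    pvCountLoop chars (a, b, c, d) =
      (a + (chars.countP pvPV : Int), b + (chars.countP pvPC : Int),
       c + (chars.countP pvPD : Int), d + (chars.countP pvPS : Int)) := by
  induction chars generalizing a b c d with
  | nil => simp [pvCountLoop]
  | cons ch t ih =>
    simp only [pvCountLoop, List.foldl_cons] at ih ⊢
    by_cases hv : pvVOWELS.contains ch <;>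
      by_cases hc : pvCONSONANTS.contains ch <;>
        by_cases hd : PySem.Chars.isdigit ch <;>
          by_cases hs : pvSPECIAL.contains ch <;>
            simp only [hv, hc, hd, hs, Bool.not_true, Bool.not_false, if_pos, if_neg,
              Bool.false_and, Bool.true_and, Bool.and_self, Bool.and_false, Bool.and_true,
              ite_true, ite_false, ih, List.countP_cons, pvPV, pvPC, pvPD, pvPS,
              Prod.mk.injEq] <;> push_cast <;> omega

-- the three constant strings as explicit character lists
lemma pvV_eq : pvVOWELS = ['a','e','i','o','u'] := by rfl
lemma pvC_eq : pvCONSONANTS = ['b','c','d','f','g','h','j','k','l','m','n','p','q','r','s','t','v','w','x','y','z'] := by rfl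
lemma pvS_eq : pvSPECIAL = ['!','@','#','$','%','^','&','*','(',')','_','-','=','+','`','~',',','.','/','\'','[',']','<','>','?','{','}','|','\\'] := by rfl

-- no vowel or consonant letter is a digit, and no special character is a letter or digit
lemma pv_cons_not_vowel : ∀ ch ∈ pvCONSONANTS, ch ∉ pvVOWELS := by
  intro ch h; rw [pvC_eq] at h; fin_cases h <;> simp [pvV_eq]

lemma pv_mem_vowel_not_digit : ∀ ch ∈ pvVOWELS, PySem.Chars.isdigit ch = false := by
  intro ch h; rw [pvV_eq] at h; fin_cases h <;> decide

lemma pv_mem_cons_not_digit : ∀ ch ∈ pvCONSONANTS, PySem.Chars.isdigit ch = false := by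
  intro ch h; rw [pvC_eq] at h; fin_cases h <;> decide

lemma pv_mem_special : ∀ ch ∈ pvSPECIAL,
    ch ∉ pvVOWELS ∧ ch ∉ pvCONSONANTS ∧ PySem.Chars.isdigit ch = false := by
  intro ch h; rw [pvS_eq] at h; fin_cases h <;>
    refine ⟨by simp [pvV_eq], by simp [pvC_eq], by decide⟩

-- each guarded predicate agrees with its plain class predicate
lemma pvPC_eq (ch : Char) : pvPC ch = pvCONSONANTS.contains ch := by
  cases hc : pvCONSONANTS.contains ch
  · simp only [pvPC, hc, Bool.and_false]
  · have hv : pvPV ch = false := by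
      simp only [pvPV, List.contains_eq_mem, decide_eq_false_iff_not]
      exact pv_cons_not_vowel ch (by simpa using hc)
    simp only [pvPC, hv, Bool.not_false, hc, Bool.true_and]

lemma pvPD_eq (ch : Char) : pvPD ch = PySem.Chars.isdigit ch := by
  cases hd : PySem.Chars.isdigit ch
  · simp only [pvPD, hd, Bool.and_false]
  · have hv : pvVOWELS.contains ch = false := by
      cases hv : pvVOWELS.contains ch
      · rfl
      · rw [pv_mem_vowel_not_digit ch (by simpa using hv)] at hd; exact hd.symm
    have hc : pvCONSONANTS.contains ch = false := by
      cases hc : pvCONSONANTS.contains ch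
      · rfl
      · rw [pv_mem_cons_not_digit ch (by simpa using hc)] at hd; exact hd.symm
    simp only [pvPD, pvPV, hv, hc, hd, Bool.not_false, Bool.true_and, Bool.and_true]

lemma pvPS_eq (ch : Char) : pvPS ch = pvSPECIAL.contains ch := by
  cases hs : pvSPECIAL.contains ch
  · simp only [pvPS, hs, Bool.and_false]
  · obtain ⟨h1, h2, h3⟩ := pv_mem_special ch (by simpa using hs)
    have hv : pvPV ch = false := by
      simp only [pvPV, List.contains_eq_mem, decide_eq_false_iff_not]; exact h1
    have hc : pvCONSONANTS.contains ch = false := by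
      simp only [List.contains_eq_mem, decide_eq_false_iff_not]; exact h2
    simp only [pvPS, hv, hc, h3, Bool.not_false, Bool.true_and, hs, Bool.and_true]

-- zero/nonzero of a countP, as Int, against any
lemma pv_cnt_zero (p : Char → Bool) (l : List Char) (h : l.any p = false) :
    ((l.countP p : Int) = 0) := by
  have : l.countP p = 0 := by
    refine List.countP_eq_zero.mpr ?_
    intro a ha
    have := List.any_eq_false.mp h a ha
    simpa using this
  exact_mod_cast this

lemma pv_cnt_pos (p : Char → Bool) (l : List Char) (h : l.any p = true) :
    (1 ≤ (l.countP p : Int)) := by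
  obtain ⟨a, ha, hpa⟩ := List.any_eq_true.mp h
  have : 0 < l.countP p := List.countP_pos_iff.mpr ⟨a, ha, by simpa using hpa⟩
  exact_mod_cast this

theorem is_valid_format_spec : Claim_equal_is_valid_format := by
  intro w _
  unfold Spec_is_valid_format is_valid_format is_valid_format_alt
  rw [pvCountLoop_eq]
  simp only [zero_add]
  have eV : w.toList.countP pvPV = w.toList.countP (fun ch => pvVOWELS.contains ch) := by
    apply List.countP_congr; intro ch _; simp [pvPV]
  have eC : w.toList.countP pvPC = w.toList.countP (fun ch => pvCONSONANTS.contains ch) := by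
    apply List.countP_congr; intro ch _; simp [pvPC_eq ch]
  have eD : w.toList.countP pvPD = w.toList.countP (fun ch => PySem.Chars.isdigit ch) := by
    apply List.countP_congr; intro ch _; simp [pvPD_eq ch]
  have eS : w.toList.countP pvPS = w.toList.countP (fun ch => pvSPECIAL.contains ch) := by
    apply List.countP_congr; intro ch _; simp [pvPS_eq ch]
  rw [eV, eC, eD, eS]
  cases hv : w.toList.any (fun ch => pvVOWELS.contains ch) <;>
    cases hc : w.toList.any (fun ch => pvCONSONANTS.contains ch) <;>
      cases hd : w.toList.any (fun ch => PySem.Chars.isdigit ch) <;>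
        cases hs : w.toList.any (fun ch => pvSPECIAL.contains ch) <;>
        · first
          | (rw [if_pos]
             · simp
             · first
               | exact Or.inl (pv_cnt_zero _ _ hv)
               | exact Or.inr (Or.inl (pv_cnt_zero _ _ hc))
               | exact Or.inr (Or.inr (Or.inl (pv_cnt_pos _ _ hd)))
               | exact Or.inr (Or.inr (Or.inr (pv_cnt_pos _ _ hs))))
          | (rw [if_neg]
             · simp
             · push_neg
               refine ⟨?_, ?_, ?_, ?_⟩
               · have := pv_cnt_pos _ _ hv; omega
               · have := pv_cnt_pos _ _ hc; omega
               · have := pv_cnt_zero _ _ hd; omega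
               · have := pv_cnt_zero _ _ hs; omega)
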